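-- pv_equiv track=rewrite | github.com/pypi-data/pypi-mirror-252 | packages/gitcoll/gitcoll-0.0.24-py3-none-any.whl/gcln/helpers.py | url_make_absolut
-- ===== SOURCE A (Python) =====
-- def url_make_absolut(pre, post):
--     pre = pre.replace("\\", "/")
--     post = post.replace("\\", "/")
--     while pre.endswith("/"):
--         pre = pre[:-1]
--     while post.startswith("../"):
--         post = post[3:]
--         if "/" in pre:
--             pre = pre[:pre.rfind("/")]
--         else:
--             pre = ""
--     if pre:
--         return pre + "/" + post
--     else:
--         return post
-- ===== SOURCE B (Python) =====
-- def url_make_absolut(pre, post):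
--     segs = pre.replace("\\", "/").split("/")
--     while segs and segs[-1] == "":
--         segs.pop()
--     post = post.replace("\\", "/")
--     n = 0
--     while post.startswith("../"):
--         post = post[3:]
--         n += 1
--     base = "/".join(segs[:max(0, len(segs) - n)])
--     return base + "/" + post if base else post
-- ===== Notes on version B (the rewrite author's own statement) =====
-- stated objective: alternative
-- what changed: B splits the base path once into a segment list, counts the leading '../' prefixes of post, truncates the segment list by that count (capped at zero) and rejoins, instead of A's loop that rescans pre with rfind and slices the string once per '../'.
import Mathlib
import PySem

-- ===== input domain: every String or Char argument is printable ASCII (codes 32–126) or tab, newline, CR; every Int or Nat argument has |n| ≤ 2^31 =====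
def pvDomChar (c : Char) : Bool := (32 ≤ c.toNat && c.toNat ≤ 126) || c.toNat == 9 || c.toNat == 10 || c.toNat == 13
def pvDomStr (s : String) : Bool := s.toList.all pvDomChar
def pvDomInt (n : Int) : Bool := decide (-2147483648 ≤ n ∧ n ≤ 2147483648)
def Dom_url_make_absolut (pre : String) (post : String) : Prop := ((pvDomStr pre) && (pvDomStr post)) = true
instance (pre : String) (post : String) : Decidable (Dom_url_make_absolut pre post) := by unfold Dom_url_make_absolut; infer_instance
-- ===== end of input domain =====

-- B re-resolves '../' by split/count/truncate/join over segment lists instead of A's repeated rfind scans; objective: alternative decomposition, same exact result.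

-- ===== PORT A =====
-- termination facts cited by the ports' decreasing_by
theorem pvStripDec {p : List Char} (h : PySem.Chars.endswith p ['/'] = true) :
    (PySem.Chars.slice p none (some (-1))).length < p.length := by
  rw [PySem.Chars.endswith_iff] at h
  have hne : p ≠ [] := by rintro rfl; simpa using h.length_le
  have hpos : 0 < p.length := List.length_pos_of_ne_nil hne
  simp only [PySem.Chars.slice_eq_listSlice, PySem.List.slice_to_neg_one, List.length_dropLast]
  omega

theorem pvDrop3Dec {q : List Char} (h : PySem.Chars.startswith q ['.','.','/'] = true) :
    (PySem.Chars.slice q (some 3) none).length < q.length := by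
  rw [PySem.Chars.startswith_iff] at h
  have h3 : 3 ≤ q.length := by simpa using h.length_le
  have hq : PySem.Chars.slice q (some 3) none = q.drop 3 := by
    have := PySem.List.slice_from_natCast q 3
    simpa using this
  rw [PySem.Chars.slice_eq_listSlice] at hq
  rw [PySem.Chars.slice_eq_listSlice, hq, List.length_drop]
  omega

-- while pre.endswith("/"): pre = pre[:-1]
def aStrip (p : List Char) : List Char :=
  if h : PySem.Chars.endswith p ['/'] then aStrip (PySem.Chars.slice p none (some (-1))) else p
termination_by p.length
decreasing_by exact pvStripDec h

-- while post.startswith("../"): post = post[3:]; pre = pre[:pre.rfind("/")] if "/" in pre else ""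
def aLoop (p q : List Char) : List Char × List Char :=
  if h : PySem.Chars.startswith q ['.','.','/'] then
    aLoop (if PySem.Chars.isIn ['/'] p then
             PySem.Chars.slice p none (some (PySem.Chars.rfind p ['/']))
           else [])
          (PySem.Chars.slice q (some 3) none)
  else (p, q)
termination_by q.length
decreasing_by exact pvDrop3Dec h

def url_make_absolut (pre : String) (post : String) : String :=
  let p := PySem.Chars.replace pre.toList ['\\'] ['/']
  let q := PySem.Chars.replace post.toList ['\\'] ['/']
  let r := aLoop (aStrip p) q
  if r.1 ≠ [] then String.ofList (r.1 ++ '/' :: r.2) else String.ofList r.2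

-- ===== PORT B =====
theorem pvPopDec {segs : List (List Char)} (h : segs.getLast? = some ([] : List Char)) :
    segs.dropLast.length < segs.length := by
  have hne : segs ≠ [] := by rintro rfl; simp at h
  have := List.length_pos_of_ne_nil hne
  simp only [List.length_dropLast]; omega

-- while segs and segs[-1] == "": segs.pop()
def bPop (segs : List (List Char)) : List (List Char) :=
  if h : segs.getLast? = some ([] : List Char) then bPop segs.dropLast else segs
termination_by segs.length
decreasing_by exact pvPopDec h

-- n = 0; while post.startswith("../"): post = post[3:]; n += 1
def bCount (n : Nat) (q : List Char) : Nat × List Char :=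
  if h : PySem.Chars.startswith q ['.','.','/'] then
    bCount (n+1) (PySem.Chars.slice q (some 3) none)
  else (n, q)
termination_by q.length
decreasing_by exact pvDrop3Dec h

def url_make_absolut_alt (pre : String) (post : String) : String :=
  let segs := bPop (PySem.Chars.splitOn (PySem.Chars.replace pre.toList ['\\'] ['/']) ['/'])
  let nr := bCount 0 (PySem.Chars.replace post.toList ['\\'] ['/'])
  -- segs[:max(0, len(segs) - n)] : Nat subtraction is exactly Python's max(0, len - n)
  let base := PySem.Chars.join ['/'] (segs.take (segs.length - nr.1))
  if base ≠ [] then String.ofList (base ++ '/' :: nr.2) else String.ofList nr.2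

-- ===== PRECONDITION & SPEC =====
def Spec_url_make_absolut (pre : String) (post : String) (out : String) : Prop := out = url_make_absolut_alt pre post
instance (pre : String) (post : String) (out : String) : Decidable (Spec_url_make_absolut pre post out) := by unfold Spec_url_make_absolut; infer_instance

-- ===== CLAIM (what is proved, stated in full; the proofs are below) =====
def Claim_equal_url_make_absolut : Prop := ∀ (pre : String) (post : String), Dom_url_make_absolut pre post → Spec_url_make_absolut pre post (url_make_absolut pre post)

-- ===== LEMMAS AND PROOFS =====

-- structural characterisation of PySem.Chars.splitOn on the single-char separator '/'
def mySplit : List Char → List (List Char)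
  | [] => [[]]
  | c :: r => if c = '/' then [] :: mySplit r else (mySplit r).modifyHead (c :: ·)

theorem mySplit_ne_nil (s : List Char) : mySplit s ≠ [] := by
  induction s with
  | nil => simp [mySplit]
  | cons c r ih =>
    simp only [mySplit]
    split
    · simp
    · cases h : mySplit r with
      | nil => exact absurd h ih
      | cons a t => simp

theorem splitOn_go_eq (fuel : Nat) (l cur : List Char) (acc : List (List Char))
    (h : l.length ≤ fuel) :
    PySem.Chars.splitOn.go ['/'] fuel l cur acc
      = acc.reverse ++ (mySplit l).modifyHead (cur.reverse ++ ·) := by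
  induction fuel generalizing l cur acc with
  | zero =>
    have hl : l = [] := List.length_eq_zero_iff.mp (Nat.le_zero.mp h)
    subst hl
    simp [PySem.Chars.splitOn.go, mySplit]
  | succ f ih =>
    cases l with
    | nil => simp [PySem.Chars.splitOn.go, mySplit]
    | cons c rest =>
      rw [PySem.Chars.splitOn.go]
      by_cases hc : c = '/'
      · have hpre : List.isPrefixOf ['/'] (c :: rest) = true := by
          simp [List.isPrefixOf, hc]
        rw [if_pos hpre]
        have hlen : rest.length ≤ f := by simp at h; omega
        rw [show List.drop (['/'] : List Char).length (c :: rest) = rest by simp]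
        rw [ih rest [] (cur.reverse :: acc) hlen]
        simp only [mySplit, if_pos hc, List.modifyHead, List.reverse_cons, List.reverse_nil,
          List.nil_append]
        cases mySplit rest <;> simp
      · have hpre : List.isPrefixOf ['/'] (c :: rest) = false := by
          simp [List.isPrefixOf]
          intro hcc
          exact absurd hcc.symm hc
        rw [if_neg (by simp [hpre])]
        have hlen : rest.length ≤ f := by simp at h; omega
        rw [ih rest (c :: cur) acc hlen]
        simp only [mySplit, if_neg hc]
        cases hms : mySplit rest with
        | nil => exact absurd hms (mySplit_ne_nil rest)
        | cons a t => simp [List.modifyHead]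
theorem splitOn_eq_mySplit (s : List Char) : PySem.Chars.splitOn s ['/'] = mySplit s := by
  rw [PySem.Chars.splitOn, splitOn_go_eq _ _ _ _ (by omega)]
  simp only [List.reverse_nil, List.nil_append]
  cases mySplit s <;> simp
def SegOK (segs : List (List Char)) : Prop := ∀ t ∈ segs, '/' ∉ t

theorem mySplit_segok (s : List Char) : SegOK (mySplit s) := by
  induction s with
  | nil => intro t ht; simp [mySplit] at ht; simp [ht]
  | cons c r ih =>
    intro t ht
    simp only [mySplit] at ht
    by_cases hc : c = '/'
    · simp [hc] at ht
      rcases ht with h | h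
      · simp [h]
      · exact ih t h
    · cases h : mySplit r with
      | nil => exact absurd h (mySplit_ne_nil r)
      | cons a rest =>
        simp [hc, h] at ht
        rcases ht with h1 | h1
        · subst h1
          intro hm
          rcases List.mem_cons.mp hm with h2 | h2
          · exact hc h2.symm
          · exact ih a (by rw [h]; simp) h2
        · exact ih t (by rw [h]; simp [h1])

theorem join_cons_ne_nil (x : List Char) (rest : List (List Char)) (h : rest ≠ []) :
    PySem.Chars.join ['/'] (x :: rest) = x ++ '/' :: PySem.Chars.join ['/'] rest := by
  cases rest with
  | nil => exact absurd rfl h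
  | cons b t => rw [PySem.Chars.join_cons_cons]; simp

theorem join_mySplit (s : List Char) : PySem.Chars.join ['/'] (mySplit s) = s := by
  induction s with
  | nil => simp [mySplit, PySem.Chars.join_singleton]
  | cons c r ih =>
    by_cases hc : c = '/'
    · simp only [mySplit, if_pos hc]
      rw [join_cons_ne_nil _ _ (mySplit_ne_nil r), ih, hc]
      rfl
    · simp only [mySplit, if_neg hc]
      cases h : mySplit r with
      | nil => exact absurd h (mySplit_ne_nil r)
      | cons a rest =>
        rw [h] at ih
        cases rest with
        | nil =>
          simp only [List.modifyHead, PySem.Chars.join_singleton] at *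
          rw [← ih]
        | cons b t =>
          simp only [List.modifyHead, PySem.Chars.join_cons_cons] at *
          rw [← ih]
          simp
theorem join_concat (v : List (List Char)) (u : List Char) (hv : v ≠ []) :
    PySem.Chars.join ['/'] (v ++ [u]) = PySem.Chars.join ['/'] v ++ '/' :: u := by
  induction v with
  | nil => exact absurd rfl hv
  | cons a w ih =>
    cases w with
    | nil => simp [PySem.Chars.join_cons_cons, PySem.Chars.join_singleton]
    | cons b t =>
      rw [List.cons_append, join_cons_ne_nil a ((b :: t) ++ [u]) (by simp), ih (by simp),
          join_cons_ne_nil a (b :: t) (by simp)]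
      simp
theorem rfind_go_eq (v u : List Char) (hu : '/' ∉ u) (k : Nat)
    (hk : v.length + k ≤ (v ++ '/' :: u).length) :
    PySem.Chars.rfind.go (v ++ '/' :: u) ['/'] (v.length + k) = (v.length : Int) := by
  induction k with
  | zero =>
    cases hv : v with
    | nil =>
      simp only [List.nil_append, List.length_nil, Nat.add_zero]
      rw [PySem.Chars.rfind.go]
      simp [List.isPrefixOf]
    | cons a w =>
      rw [show (a :: w).length + 0 = w.length + 1 by simp, PySem.Chars.rfind.go]
      have hdrop : List.drop (w.length + 1) (a :: w ++ '/' :: u) = '/' :: u := by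
        rw [show w.length + 1 = (a :: w).length by simp]
        exact List.drop_left
      rw [hdrop]
      simp [List.isPrefixOf]
  | succ k ih =>
    rw [show v.length + (k + 1) = (v.length + k) + 1 by omega, PySem.Chars.rfind.go]
    have hdrop : List.drop (v.length + k + 1) (v ++ '/' :: u) = List.drop k u := by
      rw [show v.length + k + 1 = (v ++ ['/']).length + k by simp; omega,
          show v ++ '/' :: u = (v ++ ['/']) ++ u by simp]
      exact List.drop_length_add_append k
    have hnp : List.isPrefixOf ['/'] (List.drop (v.length + k + 1) (v ++ '/' :: u)) = false := by
      rw [hdrop]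
      cases hcase : List.isPrefixOf ['/'] (List.drop k u) with
      | false => rfl
      | true =>
        have hp := List.isPrefixOf_iff_prefix.mp hcase
        have hm : '/' ∈ List.drop k u := hp.subset (by simp)
        exact absurd (List.mem_of_mem_drop hm) hu
    rw [if_neg (by simp [hnp])]
    exact ih (by simp at hk ⊢; omega)
theorem rfind_concat (v u : List Char) (hu : '/' ∉ u) :
    PySem.Chars.rfind (v ++ '/' :: u) ['/'] = (v.length : Int) := by
  rw [PySem.Chars.rfind, show (v ++ '/' :: u).length = v.length + (u.length + 1) by simp]
  exact rfind_go_eq v u hu (u.length + 1) (by simp)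
theorem step_eq (segs : List (List Char)) (h : SegOK segs) :
    (if PySem.Chars.isIn ['/'] (PySem.Chars.join ['/'] segs) then
        PySem.Chars.slice (PySem.Chars.join ['/'] segs) none
          (some (PySem.Chars.rfind (PySem.Chars.join ['/'] segs) ['/']))
      else []) = PySem.Chars.join ['/'] segs.dropLast := by
  rcases List.eq_nil_or_concat segs with rfl | ⟨v, u, rfl⟩
  case inl =>
    rw [PySem.Chars.join_nil, if_neg (by decide), List.dropLast_nil, PySem.Chars.join_nil]
  case inr =>
    simp only [List.concat_eq_append] at h ⊢
    have hu : '/' ∉ u := h u (by simp)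
    by_cases hv : v = []
    · subst hv
      rw [List.nil_append, PySem.Chars.join_singleton]
      have hni : PySem.Chars.isIn ['/'] u = false := by
        rw [← Bool.not_eq_true, PySem.Chars.isIn_iff_infix, List.singleton_infix_iff]
        exact hu
      rw [if_neg (by simp [hni]), List.dropLast_singleton, PySem.Chars.join_nil]
    · rw [join_concat v u hv, List.dropLast_concat]
      have hin : PySem.Chars.isIn ['/'] (PySem.Chars.join ['/'] v ++ '/' :: u) = true := by
        rw [PySem.Chars.isIn_iff_infix, List.singleton_infix_iff]
        simp
      rw [if_pos (by simp [hin]), rfind_concat _ _ hu, PySem.Chars.slice_eq_listSlice,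
          PySem.List.slice_to_natCast, List.take_left]
theorem bCount_succ (n : Nat) (q : List Char) :
    bCount (n+1) q = ((bCount n q).1 + 1, (bCount n q).2) := by
  fun_induction bCount n q with
  | case1 n q hs ih =>
    rw [bCount, dif_pos hs]
    exact ih
  | case2 n q hs =>
    rw [bCount, dif_neg hs]

theorem bCount_shift (q : List Char) (n : Nat) :
    bCount n q = (n + (bCount 0 q).1, (bCount 0 q).2) := by
  induction n with
  | zero => simp
  | succ m ih => rw [bCount_succ, ih]; simp; omega
theorem segok_dropLast (segs : List (List Char)) (h : SegOK segs) : SegOK segs.dropLast := by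
  intro t ht
  exact h t (List.dropLast_sublist segs |>.mem ht)

theorem main_loop (q : List Char) (segs : List (List Char)) (h : SegOK segs) :
    aLoop (PySem.Chars.join ['/'] segs) q
      = (PySem.Chars.join ['/'] (segs.take (segs.length - (bCount 0 q).1)), (bCount 0 q).2) := by
  suffices H : ∀ n (q : List Char), q.length ≤ n → ∀ segs, SegOK segs →
      aLoop (PySem.Chars.join ['/'] segs) q
        = (PySem.Chars.join ['/'] (segs.take (segs.length - (bCount 0 q).1)), (bCount 0 q).2) from
    H q.length q le_rfl segs h
  intro n
  induction n with
  | zero =>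
    intro q hq segs hs
    have hqnil : q = [] := List.length_eq_zero_iff.mp (Nat.le_zero.mp hq)
    subst hqnil
    rw [aLoop, dif_neg (by decide), bCount, dif_neg (by decide)]
    simp [List.take_length]
  | succ m ih =>
    intro q hq segs hs
    by_cases hstart : PySem.Chars.startswith q ['.', '.', '/'] = true
    · rw [aLoop, dif_pos hstart, step_eq segs hs]
      have hlen : (PySem.Chars.slice q (some 3)).length ≤ m := by
        have := pvDrop3Dec hstart
        omega
      rw [ih _ hlen _ (segok_dropLast segs hs)]
      conv_rhs => rw [bCount, dif_pos hstart, bCount_shift]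
      have harr : segs.dropLast.take (segs.dropLast.length - (bCount 0 (PySem.Chars.slice q (some 3))).1)
          = segs.take (segs.length - (0 + 1 + (bCount 0 (PySem.Chars.slice q (some 3))).1)) := by
        rw [List.length_dropLast, List.dropLast_eq_take, List.take_take]
        congr 1
        omega
      rw [harr]
    · rw [aLoop, dif_neg hstart, bCount, dif_neg hstart]
      simp [List.take_length]
theorem segok_bPop (segs : List (List Char)) (h : SegOK segs) : SegOK (bPop segs) := by
  fun_induction bPop segs with
  | case1 segs hl ih => exact ih (segok_dropLast segs h)
  | case2 segs hl => exact h

theorem endswith_concat_ne (W : List Char) (c : Char) (hc : c ≠ '/') :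
    PySem.Chars.endswith (W ++ [c]) ['/'] = false := by
  cases hcase : PySem.Chars.endswith (W ++ [c]) ['/'] with
  | false => rfl
  | true =>
    obtain ⟨t, ht⟩ := (PySem.Chars.endswith_iff _ _).mp hcase
    have := (List.append_inj' ht (by simp)).2
    simp at this
    exact absurd this.symm hc

theorem strip_eq (segs : List (List Char)) (h : SegOK segs) :
    aStrip (PySem.Chars.join ['/'] segs) = PySem.Chars.join ['/'] (bPop segs) := by
  suffices H : ∀ n (segs : List (List Char)), segs.length ≤ n → SegOK segs →
      aStrip (PySem.Chars.join ['/'] segs) = PySem.Chars.join ['/'] (bPop segs) from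
    H segs.length segs le_rfl h
  intro n
  induction n with
  | zero =>
    intro segs hlen hs
    have : segs = [] := List.length_eq_zero_iff.mp (Nat.le_zero.mp hlen)
    subst this
    rw [PySem.Chars.join_nil, aStrip, dif_neg (by decide), bPop, dif_neg (by simp),
        PySem.Chars.join_nil]
  | succ m ih =>
    intro segs hlen hs
    rcases List.eq_nil_or_concat segs with rfl | ⟨v, u, rfl⟩
    case inl =>
      rw [PySem.Chars.join_nil, aStrip, dif_neg (by decide), bPop, dif_neg (by simp),
          PySem.Chars.join_nil]
    case inr =>
      simp only [List.concat_eq_append] at hlen hs ⊢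
      by_cases hu : u = []
      · subst hu
        by_cases hv : v = []
        · subst hv
          rw [List.nil_append, PySem.Chars.join_singleton, aStrip, dif_neg (by decide),
              bPop, dif_pos (by simp), List.dropLast_singleton, bPop, dif_neg (by simp),
              PySem.Chars.join_nil]
        · have hJ : PySem.Chars.join ['/'] (v ++ [[]]) = PySem.Chars.join ['/'] v ++ ['/'] :=
            join_concat v [] hv
          rw [hJ, aStrip,
              dif_pos (by rw [PySem.Chars.endswith_iff]; exact ⟨_, rfl⟩),
              PySem.Chars.slice_eq_listSlice, PySem.List.slice_to_neg_one, List.dropLast_concat,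
              bPop, dif_pos (by rw [List.getLast?_concat]), List.dropLast_concat]
          exact ih v (by simp at hlen; omega) (fun t ht => hs t (by simp [ht]))
      · rcases List.eq_nil_or_concat u with rfl | ⟨u', c, rfl⟩
        · exact absurd rfl hu
        · have hc : c ≠ '/' := by
            intro e
            exact hs (u' ++ [c]) (by simp) (by rw [e]; simp)
          have hend : PySem.Chars.endswith (PySem.Chars.join ['/'] (v ++ [u' ++ [c]])) ['/'] = false := by
            by_cases hv : v = []
            · subst hv
              rw [List.nil_append, PySem.Chars.join_singleton]
              exact endswith_concat_ne u' c hc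
            · rw [join_concat v _ hv, show PySem.Chars.join ['/'] v ++ '/' :: (u' ++ [c])
                    = (PySem.Chars.join ['/'] v ++ '/' :: u') ++ [c] by simp]
              exact endswith_concat_ne _ c hc
          rw [aStrip, dif_neg (by simp [hend]), bPop,
              dif_neg (by rw [List.getLast?_concat]; simp)]
theorem url_make_absolut_spec : Claim_equal_url_make_absolut := by
  intro pre post _
  show url_make_absolut pre post = url_make_absolut_alt pre post
  simp only [url_make_absolut, url_make_absolut_alt, splitOn_eq_mySplit]
  have h1 : aStrip (PySem.Chars.replace pre.toList ['\\'] ['/'])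
      = PySem.Chars.join ['/'] (bPop (mySplit (PySem.Chars.replace pre.toList ['\\'] ['/']))) := by
    calc aStrip (PySem.Chars.replace pre.toList ['\\'] ['/'])
        = aStrip (PySem.Chars.join ['/'] (mySplit (PySem.Chars.replace pre.toList ['\\'] ['/']))) := by
          rw [join_mySplit]
      _ = _ := strip_eq _ (mySplit_segok _)
  rw [h1, main_loop _ _ (segok_bPop _ (mySplit_segok _))]
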